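-- pv_equiv track=rewrite | github.com/salehjafarli/leetcode | lc1838.py | maxFrequencySliding
-- ===== SOURCE A (Python) =====
-- def maxFrequencySliding(nums, k: int) -> int:
--     nums.sort()
--
--     diffs = l = 0
--     res = 1
--     for r in range(1, len(nums)):
--         diff = nums[r] - nums[r - 1]
--         k -= (r - l) * diff
--
--         while k < 0:
--             diff = nums[r] - nums[l]
--             k += diff
--             l += 1
--
--         res = max(res, r - l + 1)
--
--     return res
-- ===== SOURCE B (Python) =====
-- def maxFrequencySliding(nums, k: int) -> int:
--     # Sort, build a prefix-sum table, then for each right endpoint binary-search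
--     # the smallest left index whose raise-to-nums[r] cost fits in k.
--     nums.sort()
--     n = len(nums)
--     P = [0]
--     acc = 0
--     for x in nums:
--         acc += x
--         P.append(acc)
--     res = 1
--     for r in range(n):
--         lo, hi = 0, r
--         while lo < hi:
--             mid = (lo + hi) // 2
--             if nums[r] * (r - mid + 1) - (P[r + 1] - P[mid]) <= k:
--                 hi = mid
--             else:
--                 lo = mid + 1
--         if nums[r] * (r - lo + 1) - (P[r + 1] - P[lo]) <= k:
--             res = max(res, r - lo + 1)
--     return res
-- ===== Notes on version B (the rewrite author's own statement) =====
-- stated objective: alternative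
-- what changed: Replaces A's amortized moving-left-pointer with an incremental k-deficit by a prefix-sum table plus a per-right-endpoint binary search for the smallest feasible left index.
import Mathlib
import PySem

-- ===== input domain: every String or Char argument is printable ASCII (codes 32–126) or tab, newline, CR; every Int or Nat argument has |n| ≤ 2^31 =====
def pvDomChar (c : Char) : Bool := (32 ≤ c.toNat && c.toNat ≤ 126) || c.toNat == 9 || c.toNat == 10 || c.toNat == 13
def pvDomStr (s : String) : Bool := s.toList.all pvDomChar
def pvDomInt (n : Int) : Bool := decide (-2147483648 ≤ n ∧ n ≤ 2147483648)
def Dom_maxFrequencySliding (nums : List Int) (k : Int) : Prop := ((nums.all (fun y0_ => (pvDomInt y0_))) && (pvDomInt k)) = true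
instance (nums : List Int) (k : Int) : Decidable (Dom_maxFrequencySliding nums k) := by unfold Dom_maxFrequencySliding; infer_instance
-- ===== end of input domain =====

-- B replaces A's amortized left-pointer scan with incremental k-deficit by a prefix-sum
-- table plus a per-right-endpoint binary search (same return value; both Pythons sort their
-- list argument in place — the equivalence proved here is about the return value).

-- ===== PORT A =====
-- the inner 'while k < 0' loop; the fuel argument only makes it total (inside Pre_ the
-- loop stops with l ≤ r < len, so fuel = len is never exhausted and indexing is in range)
def pyAWhile (s : List Int) (r : Int) : Int → Int → Nat → (Int × Int)
  | l, kk, 0 => (l, kk)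
  | l, kk, fuel+1 =>
    if kk < 0 then
      let diff := PySem.List.pyGetD s r 0 - PySem.List.pyGetD s l 0
      pyAWhile s r (l + 1) (kk + diff) fuel
    else (l, kk)

-- the body of A's 'for r in range(1, len(nums))' loop; state = (l, k, res)
def pyAStep (s : List Int) (st : Int × Int × Int) (r : Int) : Int × Int × Int :=
  let diff := PySem.List.pyGetD s r 0 - PySem.List.pyGetD s (r - 1) 0
  let kk := st.2.1 - (r - st.1) * diff
  let lw := pyAWhile s r st.1 kk s.length
  (lw.1, lw.2, max st.2.2 (r - lw.1 + 1))

def maxFrequencySliding (nums : List Int) (k : Int) : Int :=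
  let s := PySem.List.sorted nums (fun x => x) false
  ((PySem.List.pyRange 1 (s.length : Int) 1).foldl (pyAStep s) ((0 : Int), k, (1 : Int))).2.2

-- ===== PORT B =====
-- the manual lo/hi binary search of Source B; fuel only makes it total (the interval shrinks
-- each round, so fuel = len + 1 suffices); indices into s and P are always in range
def pyBSearch (s P : List Int) (k : Int) (r : Int) : Int → Int → Nat → Int
  | lo, _, 0 => lo
  | lo, hi, fuel+1 =>
    if lo < hi then
      let mid := PySem.Int.floordiv (lo + hi) 2
      if PySem.List.pyGetD s r 0 * (r - mid + 1) -
          (PySem.List.pyGetD P (r + 1) 0 - PySem.List.pyGetD P mid 0) ≤ k then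
        pyBSearch s P k r lo mid fuel
      else
        pyBSearch s P k r (mid + 1) hi fuel
    else lo

-- the body of Source B's 'for r in range(n)' loop; state = res
def pyBStep (s P : List Int) (k : Int) (res : Int) (r : Int) : Int :=
  let lo := pyBSearch s P k r 0 r (s.length + 1)
  if PySem.List.pyGetD s r 0 * (r - lo + 1) -
      (PySem.List.pyGetD P (r + 1) 0 - PySem.List.pyGetD P lo 0) ≤ k then
    max res (r - lo + 1)
  else res

def maxFrequencySliding_alt (nums : List Int) (k : Int) : Int :=
  let s := PySem.List.sorted nums (fun x => x) false
  let P := (s.foldl (fun st x => (st.1 ++ [st.2 + x], st.2 + x)) (([(0 : Int)]), (0 : Int))).1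
  (PySem.List.pyRange 0 (s.length : Int) 1).foldl (pyBStep s P k) (1 : Int)

-- ===== PRECONDITION & SPEC =====
-- Pre_ excludes exactly the inputs where A raises IndexError: with k < 0 and at least two
-- elements A's while-loop walks l past the end of the list.
def Pre_maxFrequencySliding (nums : List Int) (k : Int) : Prop := 0 ≤ k ∨ nums.length ≤ 1
instance (nums : List Int) (k : Int) : Decidable (Pre_maxFrequencySliding nums k) := by
  unfold Pre_maxFrequencySliding; infer_instance
def pvWitness_maxFrequencySliding : List Int × Int := ([1, 2, 4], 5)

def Spec_maxFrequencySliding (nums : List Int) (k : Int) (out : Int) : Prop := out = maxFrequencySliding_alt nums k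
instance (nums : List Int) (k : Int) (out : Int) : Decidable (Spec_maxFrequencySliding nums k out) := by unfold Spec_maxFrequencySliding; infer_instance

-- ===== CLAIM (what is proved, stated in full; the proofs are below) =====
def Claim_equal_maxFrequencySliding : Prop := ∀ (nums : List Int) (k : Int), Dom_maxFrequencySliding nums k → Pre_maxFrequencySliding nums k → Spec_maxFrequencySliding nums k (maxFrequencySliding nums k)

-- ===== LEMMAS AND PROOFS =====

-- prefix sum of the first i elements (i an Int index, always 0 ≤ i ≤ len where used)
def pvS (s : List Int) (i : Int) : Int := (s.take i.toNat).sum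

-- cost of raising window [l, r] to s[r]
def pvC (s : List Int) (l r : Int) : Int :=
  PySem.List.pyGetD s r 0 * (r - l + 1) - (pvS s (r + 1) - pvS s l)

-- the minimal feasible left endpoint for right endpoint r, characterized
def pvIsMin (s : List Int) (k r l : Int) : Prop :=
  0 ≤ l ∧ l ≤ r ∧ pvC s l r ≤ k ∧ ∀ j : Int, 0 ≤ j → j < l → k < pvC s j r

theorem pvIsMin_unique {s : List Int} {k r l₁ l₂ : Int}
    (h₁ : pvIsMin s k r l₁) (h₂ : pvIsMin s k r l₂) : l₁ = l₂ := by
  obtain ⟨h10, _, h1c, h1m⟩ := h₁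
  obtain ⟨h20, _, h2c, h2m⟩ := h₂
  rcases lt_trichotomy l₁ l₂ with h | h | h
  · exact absurd h1c (not_le.mpr (h2m l₁ h10 h))
  · exact h
  · exact absurd h2c (not_le.mpr (h1m l₂ h20 h))

theorem pv_g_mono {s : List Int} (hs : s.Pairwise (· ≤ ·)) {i j : Int}
    (hi : 0 ≤ i) (hij : i ≤ j) (hj : j < (s.length : Int)) :
    PySem.List.pyGetD s i 0 ≤ PySem.List.pyGetD s j 0 := by
  rcases eq_or_lt_of_le hij with rfl | hlt
  · exact le_refl _
  · rw [PySem.List.pyGetD_eq_getElem s 0 hi (by omega),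
        PySem.List.pyGetD_eq_getElem s 0 (le_trans hi hij) hj]
    exact List.pairwise_iff_getElem.mp hs i.toNat j.toNat (by omega) (by omega) (by omega)

theorem pvS_succ {s : List Int} {i : Int} (hi : 0 ≤ i) (h : i < (s.length : Int)) :
    pvS s (i + 1) = pvS s i + PySem.List.pyGetD s i 0 := by
  have hn : i.toNat < s.length := by omega
  have h1 : (i + 1).toNat = i.toNat + 1 := by omega
  simp only [pvS, h1]
  rw [List.sum_take_succ, PySem.List.pyGetD_eq_getElem s 0 hi h]

theorem pvC_rr {s : List Int} {r : Int} (hr0 : 0 ≤ r) (hr : r < (s.length : Int)) :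
    pvC s r r = 0 := by
  have := pvS_succ hr0 hr
  simp only [pvC]; rw [this]; ring

theorem pvC_l_succ {s : List Int} {l r : Int} (h0 : 0 ≤ l) (hl : l < (s.length : Int)) :
    pvC s (l + 1) r = pvC s l r - (PySem.List.pyGetD s r 0 - PySem.List.pyGetD s l 0) := by
  have := pvS_succ h0 hl
  simp only [pvC]; rw [this]; ring

theorem pvC_r_step {s : List Int} {l r : Int} (h1 : 1 ≤ r) (hr : r < (s.length : Int)) :
    pvC s l r = pvC s l (r - 1) +
      (r - l) * (PySem.List.pyGetD s r 0 - PySem.List.pyGetD s (r - 1) 0) := by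
  have h2 : pvS s (r + 1) = pvS s r + PySem.List.pyGetD s r 0 := pvS_succ (by omega) hr
  have h3 : pvS s ((r - 1) + 1) = pvS s (r - 1) + PySem.List.pyGetD s (r - 1) 0 :=
    pvS_succ (by omega) (by omega)
  have h4 : (r - 1) + 1 = r := by ring
  simp only [pvC]; rw [h4, h2]; ring

theorem pvC_antitone_aux {s : List Int} (hs : s.Pairwise (· ≤ ·)) :
    ∀ (d : Nat) (l r : Int), 0 ≤ l → l + d ≤ r → r < (s.length : Int) →
      pvC s (l + d) r ≤ pvC s l r := by
  intro d
  induction d with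
  | zero => intro l r _ _ _; simp
  | succ d ih =>
    intro l r h0 hd hr
    have hd' : ((d + 1 : Nat) : Int) = (d : Int) + 1 := by push_cast; ring
    rw [hd'] at hd
    have hgl : PySem.List.pyGetD s l 0 ≤ PySem.List.pyGetD s r 0 :=
      pv_g_mono hs h0 (by omega) hr
    have h1 : pvC s (l + 1) r = pvC s l r -
        (PySem.List.pyGetD s r 0 - PySem.List.pyGetD s l 0) :=
      pvC_l_succ h0 (by omega)
    have h2 := ih (l + 1) r (by omega) (by omega) hr
    have h3 : (l : Int) + ((d + 1 : Nat) : Int) = (l + 1) + (d : Int) := by push_cast; ring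
    rw [h3]
    linarith

theorem pvC_antitone {s : List Int} (hs : s.Pairwise (· ≤ ·)) {l l' r : Int}
    (h0 : 0 ≤ l) (hll' : l ≤ l') (hl'r : l' ≤ r) (hr : r < (s.length : Int)) :
    pvC s l' r ≤ pvC s l r := by
  have h : l' = l + ((l' - l).toNat : Int) := by omega
  rw [h]
  exact pvC_antitone_aux hs (l' - l).toNat l r h0 (by omega) hr

theorem pvC_r_mono {s : List Int} (hs : s.Pairwise (· ≤ ·)) {j r : Int}
    (hj : 0 ≤ j) (hjr : j ≤ r - 1) (h1 : 1 ≤ r) (hr : r < (s.length : Int)) :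
    pvC s j (r - 1) ≤ pvC s j r := by
  have hg : PySem.List.pyGetD s (r - 1) 0 ≤ PySem.List.pyGetD s r 0 :=
    pv_g_mono hs (by omega) (by omega) hr
  have := pvC_r_step (l := j) h1 hr
  nlinarith [this]

-- A's while-loop moves l to the minimal feasible left endpoint
theorem pyAWhile_spec {s : List Int} (hs : s.Pairwise (· ≤ ·)) {k r : Int}
    (hk : 0 ≤ k) (hr0 : 0 ≤ r) (hr : r < (s.length : Int)) :
    ∀ (fuel : Nat) (l : Int), 0 ≤ l → l ≤ r →
      (∀ j : Int, 0 ≤ j → j < l → k < pvC s j r) → (r - l).toNat ≤ fuel →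
      ∃ l', pyAWhile s r l (k - pvC s l r) fuel = (l', k - pvC s l' r) ∧ pvIsMin s k r l' := by
  intro fuel
  induction fuel with
  | zero =>
    intro l h0 hlr hmin hfuel
    have hl : l = r := by omega
    refine ⟨l, rfl, h0, hlr, ?_, hmin⟩
    rw [hl, pvC_rr hr0 hr]; exact hk
  | succ fuel ih =>
    intro l h0 hlr hmin hfuel
    by_cases hneg : k - pvC s l r < 0
    · have hCl : k < pvC s l r := by omega
      have hlner : l ≠ r := by
        intro h; rw [h, pvC_rr hr0 hr] at hCl; omega
      have hlr' : l < r := lt_of_le_of_ne hlr hlner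
      have hstep : pvC s (l + 1) r = pvC s l r -
          (PySem.List.pyGetD s r 0 - PySem.List.pyGetD s l 0) := pvC_l_succ h0 (by omega)
      have hunf : pyAWhile s r l (k - pvC s l r) (fuel + 1) =
          pyAWhile s r (l + 1)
            ((k - pvC s l r) + (PySem.List.pyGetD s r 0 - PySem.List.pyGetD s l 0)) fuel := by
        simp only [pyAWhile, if_pos hneg]
      have harg : (k - pvC s l r) + (PySem.List.pyGetD s r 0 - PySem.List.pyGetD s l 0) =
          k - pvC s (l + 1) r := by rw [hstep]; ring
      rw [hunf, harg]
      refine ih (l + 1) (by omega) (by omega) ?_ (by omega)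
      intro j hj hjl
      by_cases hjl' : j < l
      · exact hmin j hj hjl'
      · have : j = l := by omega
        rw [this]; exact hCl
    · refine ⟨l, ?_, h0, hlr, by omega, hmin⟩
      simp only [pyAWhile, if_neg hneg]

-- B's binary search returns the minimal feasible left endpoint
theorem pyBSearch_spec {s P : List Int} (hs : s.Pairwise (· ≤ ·)) {k r : Int}
    (hr0 : 0 ≤ r) (hr : r < (s.length : Int))
    (hP : ∀ i : Int, 0 ≤ i → i ≤ (s.length : Int) → PySem.List.pyGetD P i 0 = pvS s i) :
    ∀ (fuel : Nat) (lo hi : Int), 0 ≤ lo → lo ≤ hi → hi ≤ r → pvC s hi r ≤ k →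
      (∀ j : Int, 0 ≤ j → j < lo → k < pvC s j r) → (hi - lo).toNat ≤ fuel →
      pvIsMin s k r (pyBSearch s P k r lo hi fuel) := by
  intro fuel
  induction fuel with
  | zero =>
    intro lo hi h0 hlohi hhir hChi hmin hfuel
    have hl : lo = hi := by omega
    show pvIsMin s k r lo
    exact ⟨h0, by omega, by rw [hl]; exact hChi, hmin⟩
  | succ fuel ih =>
    intro lo hi h0 hlohi hhir hChi hmin hfuel
    by_cases hlt : lo < hi
    · simp only [pyBSearch, if_pos hlt]
      have hmideq : PySem.Int.floordiv (lo + hi) 2 = (lo + hi) / 2 := by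
        simp [PySem.Int.floordiv, Int.fdiv_eq_ediv]
      rw [hmideq]
      set mid := (lo + hi) / 2 with hmid
      have hlomid : lo ≤ mid := by omega
      have hmidhi : mid < hi := by omega
      have hcond : PySem.List.pyGetD s r 0 * (r - mid + 1) -
          (PySem.List.pyGetD P (r + 1) 0 - PySem.List.pyGetD P mid 0) = pvC s mid r := by
        rw [hP (r + 1) (by omega) (by omega), hP mid (by omega) (by omega)]
        rfl
      rw [hcond]
      by_cases hdec : pvC s mid r ≤ k
      · rw [if_pos hdec]
        exact ih lo mid h0 hlomid (by omega) hdec hmin (by omega)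
      · rw [if_neg hdec]
        refine ih (mid + 1) hi (by omega) (by omega) hhir hChi ?_ (by omega)
        intro j hj hjm
        by_cases hjlo : j < lo
        · exact hmin j hj hjlo
        · have hmono : pvC s mid r ≤ pvC s j r :=
            pvC_antitone hs hj (by omega) (by omega) hr
          omega
    · simp only [pyBSearch, if_neg hlt]
      have hl : lo = hi := by omega
      exact ⟨h0, by omega, by rw [hl]; exact hChi, hmin⟩

-- the prefix-sum fold of Source B builds the list of partial sums
theorem pvP_fold (s : List Int) : ∀ (P0 : List Int) (a0 : Int),
    s.foldl (fun st x => (st.1 ++ [st.2 + x], st.2 + x)) (P0, a0) =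
      (P0 ++ (List.range s.length).map (fun j => a0 + (s.take (j + 1)).sum), a0 + s.sum) := by
  induction s with
  | nil => intro P0 a0; simp
  | cons x t ih =>
    intro P0 a0
    simp only [List.foldl_cons]
    rw [ih (P0 ++ [a0 + x]) (a0 + x)]
    refine Prod.ext ?_ ?_
    · simp only [List.length_cons, List.range_succ_eq_map, List.map_cons, List.map_map,
        List.append_assoc, List.singleton_append]
      have htail : List.map (fun j => a0 + x + (List.take (j + 1) t).sum) (List.range t.length)
          = List.map ((fun j => a0 + (List.take (j + 1) (x :: t)).sum) ∘ Nat.succ)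
              (List.range t.length) := by
        refine List.map_congr_left ?_
        intro a _
        simp only [Function.comp_apply, List.take_succ_cons, List.sum_cons]
        ring
      rw [htail]
      simp
    · simp only [List.sum_cons]
      ring

-- the prefix-sum fold of Source B computes the table of partial sums
theorem pvP_spec (s : List Int) :
    ∀ i : Int, 0 ≤ i → i ≤ (s.length : Int) →
      PySem.List.pyGetD (s.foldl (fun st x => (st.1 ++ [st.2 + x], st.2 + x))
        (([(0 : Int)]), (0 : Int))).1 i 0 = pvS s i := by
  intro i h0 hlen
  rw [pvP_fold s [0] 0]
  simp only [List.singleton_append, zero_add]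
  have key : ∀ (m : Nat) (hm : m < ((0 : Int) :: (List.range s.length).map
      (fun j => (s.take (j + 1)).sum)).length),
      ((0 : Int) :: (List.range s.length).map (fun j => (s.take (j + 1)).sum))[m] =
        (s.take m).sum := by
    intro m hm
    cases m with
    | zero => simp
    | succ j =>
      have hj : j < s.length := by simpa using hm
      simp [hj]
  rw [PySem.List.pyGetD_eq_getElem _ 0 h0 (by simp; omega)]
  rw [key i.toNat (by simp; omega)]
  rfl

-- one iteration of B's loop: binary search + feasibility guard
theorem pyBStep_spec {s P : List Int} {k : Int} (hs : s.Pairwise (· ≤ ·)) (hk : 0 ≤ k)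
    (hP : ∀ i : Int, 0 ≤ i → i ≤ (s.length : Int) → PySem.List.pyGetD P i 0 = pvS s i)
    {r : Int} (hr0 : 0 ≤ r) (hr : r < (s.length : Int)) (res : Int) :
    ∃ l, pvIsMin s k r l ∧ pyBStep s P k res r = max res (r - l + 1) := by
  have hmin := pyBSearch_spec (k := k) hs hr0 hr hP (s.length + 1) 0 r (le_refl 0) hr0 (le_refl r)
    (by rw [pvC_rr hr0 hr]; exact hk) (fun j hj hjl => absurd hjl (by omega)) (by omega)
  refine ⟨pyBSearch s P k r 0 r (s.length + 1), hmin, ?_⟩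
  obtain ⟨hl0, hlr, hC, _⟩ := hmin
  simp only [pyBStep]
  have hcond : PySem.List.pyGetD s r 0 * (r - pyBSearch s P k r 0 r (s.length + 1) + 1) -
      (PySem.List.pyGetD P (r + 1) 0 -
        PySem.List.pyGetD P (pyBSearch s P k r 0 r (s.length + 1)) 0) =
      pvC s (pyBSearch s P k r 0 r (s.length + 1)) r := by
    rw [hP (r + 1) (by omega) (by omega), hP _ (by omega) (by omega)]
    rfl
  rw [hcond, if_pos hC]

-- one iteration of A's loop: incremental deficit update + while-loop advance
theorem pyAStep_spec {s : List Int} {k : Int} (hs : s.Pairwise (· ≤ ·)) (hk : 0 ≤ k)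
    {r l res : Int} (hr1 : 1 ≤ r) (hr : r < (s.length : Int))
    (hl : pvIsMin s k (r - 1) l) :
    ∃ l', pvIsMin s k r l' ∧
      pyAStep s (l, k - pvC s l (r - 1), res) r = (l', k - pvC s l' r, max res (r - l' + 1)) := by
  obtain ⟨h0, hlr, hC, hmin⟩ := hl
  have hminr : ∀ j : Int, 0 ≤ j → j < l → k < pvC s j r := by
    intro j hj hjl
    have := pvC_r_mono hs hj (by omega) hr1 hr
    have := hmin j hj hjl
    omega
  obtain ⟨l', heq, hmin'⟩ := pyAWhile_spec hs hk (by omega) hr s.length l h0 (by omega)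
    hminr (by omega)
  refine ⟨l', hmin', ?_⟩
  simp only [pyAStep]
  have harg : k - pvC s l (r - 1) -
      (r - l) * (PySem.List.pyGetD s r 0 - PySem.List.pyGetD s (r - 1) 0) =
      k - pvC s l r := by
    rw [pvC_r_step hr1 hr]; ring
  rw [harg, heq]

-- joint invariant: after both loops have processed right endpoints < m, A's state is
-- (minimal l, remaining k, res) and B's accumulator is the same res
theorem pv_main {s P : List Int} {k : Int} (hs : s.Pairwise (· ≤ ·)) (hk : 0 ≤ k)
    (hP : ∀ i : Int, 0 ≤ i → i ≤ (s.length : Int) → PySem.List.pyGetD P i 0 = pvS s i) :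
    ∀ m : Nat, 1 ≤ m → m ≤ s.length →
      ∃ l res, (PySem.List.pyRange 1 (m : Int) 1).foldl (pyAStep s) ((0 : Int), k, (1 : Int)) =
          (l, k - pvC s l ((m : Int) - 1), res) ∧
        pvIsMin s k ((m : Int) - 1) l ∧
        (PySem.List.pyRange 0 (m : Int) 1).foldl (pyBStep s P k) (1 : Int) = res := by
  intro m h1
  revert h1
  intro h1
  induction m, h1 using Nat.le_induction with
  | base =>
    intro h1
    have hlen : (0 : Int) < (s.length : Int) := by exact_mod_cast h1
    have hC00 : pvC s 0 0 = 0 := pvC_rr (le_refl 0) hlen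
    have hminA : pvIsMin s k 0 0 :=
      ⟨le_refl 0, le_refl 0, by rw [hC00]; exact hk, fun j hj hjl => absurd hjl (by omega)⟩
    obtain ⟨lB, hminB, hB⟩ := pyBStep_spec hs hk hP (le_refl 0) hlen 1
    have hlB : lB = 0 := pvIsMin_unique hminB hminA
    refine ⟨0, 1, ?_, ?_, ?_⟩
    · rw [PySem.List.pyRange_one_eq_nil (by norm_num)]
      simp only [List.foldl_nil]
      norm_num [hC00]
    · norm_num [hminA]
    · have h01 : (PySem.List.pyRange 0 ((1 : Nat) : Int) 1) = [0] := by decide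
      rw [h01]
      simp only [List.foldl_cons, List.foldl_nil]
      rw [hB, hlB]
      norm_num
  | succ m hm ih =>
    intro hmn
    obtain ⟨l, res, hA, hmin, hB⟩ := ih (by omega)
    have hrm1 : (1 : Int) ≤ (m : Int) := by exact_mod_cast hm
    have hrmn : ((m : Int)) < (s.length : Int) := by exact_mod_cast hmn
    obtain ⟨l', hmin', hstepA⟩ := pyAStep_spec hs hk hrm1 hrmn (r := (m : Int)) (res := res) hmin
    obtain ⟨lB, hminB, hstepB⟩ := pyBStep_spec hs hk hP (by omega) hrmn res
    have hlB : lB = l' := pvIsMin_unique hminB hmin'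
    have hcast : ((m + 1 : Nat) : Int) = (m : Int) + 1 := by push_cast; ring
    refine ⟨l', max res ((m : Int) - l' + 1), ?_, ?_, ?_⟩
    · rw [hcast, PySem.List.pyRange_one_succ_right (by omega), List.foldl_append, hA]
      simp only [List.foldl_cons, List.foldl_nil]
      rw [hstepA]
      have : (m : Int) + 1 - 1 = (m : Int) := by ring
      rw [this]
    · have : ((m + 1 : Nat) : Int) - 1 = (m : Int) := by push_cast; ring
      rw [this]; exact hmin'
    · rw [hcast, PySem.List.pyRange_one_succ_right (by omega), List.foldl_append, hB]
      simp only [List.foldl_cons, List.foldl_nil]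
      rw [hstepB, hlB]

-- both ports, on the sorted list, with B's prefix table spelled out
theorem pv_total (s : List Int) (k : Int) (hs : s.Pairwise (· ≤ ·))
    (hpre : 0 ≤ k ∨ s.length ≤ 1) :
    ((PySem.List.pyRange 1 (s.length : Int) 1).foldl (pyAStep s) ((0 : Int), k, (1 : Int))).2.2 =
      (PySem.List.pyRange 0 (s.length : Int) 1).foldl
        (pyBStep s (s.foldl (fun st x => (st.1 ++ [st.2 + x], st.2 + x))
          (([(0 : Int)]), (0 : Int))).1 k) (1 : Int) := by
  have hP := pvP_spec s
  rcases Nat.eq_zero_or_pos s.length with h0 | h1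
  · rw [h0]
    rw [show ((0 : Nat) : Int) = 0 from rfl]
    rw [PySem.List.pyRange_one_eq_nil (by norm_num), PySem.List.pyRange_one_eq_nil (by norm_num)]
    rfl
  · by_cases hk : 0 ≤ k
    · obtain ⟨l, res, hA, hmin, hB⟩ := pv_main hs hk hP s.length h1 (le_refl _)
      rw [hA, hB]
    · have hn1 : s.length = 1 := by omega
      obtain ⟨x, hx⟩ := List.length_eq_one_iff.mp hn1
      subst hx
      rw [show ((List.length [x] : Nat) : Int) = 1 from by norm_num]
      rw [PySem.List.pyRange_one_eq_nil (le_refl 1)]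
      rw [show PySem.List.pyRange (0 : Int) 1 1 = [0] from by decide]
      simp only [List.foldl_nil, List.foldl_cons, pyBStep, pyBSearch]
      norm_num [PySem.List.pyGetD, hk]

-- ===== VERDICT (by name: the statement is the Claim_ definition above) =====
theorem maxFrequencySliding_spec : Claim_equal_maxFrequencySliding := by
  unfold Claim_equal_maxFrequencySliding
  intro nums k _ hpre
  unfold Spec_maxFrequencySliding Pre_maxFrequencySliding at *
  have hs : (PySem.List.sorted nums (fun x => x) false).Pairwise (· ≤ ·) :=
    PySem.List.sorted_pairwise nums (fun x => x)
  have hlen : (PySem.List.sorted nums (fun x => x) false).length = nums.length :=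
    PySem.List.length_sorted nums (fun x => x) false
  exact pv_total (PySem.List.sorted nums (fun x => x) false) k hs (by rw [hlen]; exact hpre)
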